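-- pv_equiv track=rewrite | github.com/gavieeen/simulations | LCQ/test17.py | find_quadruples_optim
-- ===== SOURCE A (Python) =====
-- from collections import defaultdict
--
-- def find_quadruples_optim(nums):
--     # rearrange equation to nums[a] + nums[b] = -nums[c] + nums[d]
--     n = len(nums)
--     quadruples = 0
--     ab_sum = defaultdict(int)
--
--     for c in range(2, n - 1):
--         b = c - 1
--         for a in range(b):
--             ab_sum[nums[a] + nums[b]] += 1
--
--         for d in range(c + 1, n):
--             quadruples += ab_sum[-nums[c] + nums[d]]
--
--     return quadruples
-- ===== SOURCE B (Python) =====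
-- def find_quadruples_optim(nums):
--     # Brute-force enumeration: for each (c, d) rescan all earlier pairs (a, b),
--     # instead of maintaining an incremental pair-sum hash table.
--     n = len(nums)
--     count = 0
--     for c in range(2, n - 1):
--         for d in range(c + 1, n):
--             target = nums[d] - nums[c]
--             for b in range(1, c):
--                 for a in range(b):
--                     if nums[a] + nums[b] == target:
--                         count += 1
--     return count
-- ===== Notes on version B (the rewrite author's own statement) =====
-- stated objective: simpler
-- what changed: B drops A's incrementally-maintained pair-sum hash table and instead, for each (c,d), directly rescans all pairs a<b<c counting those with nums[a]+nums[b]==nums[d]-nums[c].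
import Mathlib
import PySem

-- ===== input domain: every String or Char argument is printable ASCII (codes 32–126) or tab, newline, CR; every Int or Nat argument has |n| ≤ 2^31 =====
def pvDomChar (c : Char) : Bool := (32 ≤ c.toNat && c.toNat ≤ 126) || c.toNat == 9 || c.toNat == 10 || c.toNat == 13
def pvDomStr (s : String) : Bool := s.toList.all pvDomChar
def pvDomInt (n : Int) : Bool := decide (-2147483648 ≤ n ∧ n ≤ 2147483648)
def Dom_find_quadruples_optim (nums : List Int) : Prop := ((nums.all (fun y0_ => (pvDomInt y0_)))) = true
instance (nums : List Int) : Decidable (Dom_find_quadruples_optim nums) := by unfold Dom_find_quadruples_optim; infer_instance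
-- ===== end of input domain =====

-- B drops A's incrementally maintained pair-sum hash table and rescans all pairs a<b<c per (c,d); objective: simpler (no table), not faster.

-- nums[i] for an index that is always in range in both programs, ported as pyGetD with default 0 (exact here)
def pvGet (nums : List Int) (i : Int) : Int := PySem.List.pyGetD nums i 0

-- ===== PORT A =====
-- state: (quadruples, ab_sum); the defaultdict read 'ab_sum[...]' in the d-loop is ported as getD _ _ 0
-- (the zero entry such a read inserts can never change any value read later)
def find_quadruples_optim (nums : List Int) : Int :=
  let n : Int := nums.length
  ((PySem.List.pyRange 2 (n - 1) 1).foldl (fun (st : Int × PySem.Dict Int Int) c =>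
    let b := c - 1
    let d1 := (PySem.List.pyRange 0 b 1).foldl
      (fun dct a => dct.modify (pvGet nums a + pvGet nums b) 0 (· + 1)) st.2
    let q := (PySem.List.pyRange (c + 1) n 1).foldl
      (fun acc d => acc + d1.getD (-(pvGet nums c) + pvGet nums d) 0) st.1
    (q, d1)) ((0 : Int), PySem.Dict.empty)).1

-- ===== PORT B =====
def find_quadruples_optim_alt (nums : List Int) : Int :=
  let n : Int := nums.length
  (PySem.List.pyRange 2 (n - 1) 1).foldl (fun acc c =>
    (PySem.List.pyRange (c + 1) n 1).foldl (fun acc d =>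
      let target := pvGet nums d - pvGet nums c
      (PySem.List.pyRange 1 c 1).foldl (fun acc b =>
        (PySem.List.pyRange 0 b 1).foldl (fun acc a =>
          if pvGet nums a + pvGet nums b == target then acc + 1 else acc) acc) acc) acc) 0

-- ===== PRECONDITION & SPEC =====
def Spec_find_quadruples_optim (nums : List Int) (out : Int) : Prop := out = find_quadruples_optim_alt nums
instance (nums : List Int) (out : Int) : Decidable (Spec_find_quadruples_optim nums out) := by unfold Spec_find_quadruples_optim; infer_instance

-- ===== CLAIM (what is proved, stated in full; the proofs are below) =====
def Claim_equal_find_quadruples_optim : Prop := ∀ (nums : List Int), Dom_find_quadruples_optim nums → Spec_find_quadruples_optim nums (find_quadruples_optim nums)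

-- ===== LEMMAS AND PROOFS =====

-- number of pairs a < b with b < c and nums[a] + nums[b] = t
def pvS (nums : List Int) (c t : Int) : Int :=
  ((PySem.List.pyRange 1 c 1).map (fun b =>
    (((PySem.List.pyRange 0 b 1).countP (fun a => pvGet nums a + pvGet nums b == t)) : Int))).sum

-- contribution of one value of c: sum over d of the matching pair count
def pvT (nums : List Int) (c : Int) : Int :=
  ((PySem.List.pyRange (c + 1) (nums.length : Int) 1).map (fun d =>
    pvS nums c (pvGet nums d - pvGet nums c))).sum

-- B's inner double loop computes acc + pvS
lemma pvPair (nums : List Int) (c t acc : Int) :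
    (PySem.List.pyRange 1 c 1).foldl (fun acc b =>
      (PySem.List.pyRange 0 b 1).foldl (fun acc a =>
        if pvGet nums a + pvGet nums b == t then acc + 1 else acc) acc) acc
    = acc + pvS nums c t := by
  rw [PySem.List.foldl_congr_mem _ _
      (fun acc b => acc + (((PySem.List.pyRange 0 b 1).countP
        (fun a => pvGet nums a + pvGet nums b == t)) : Int)) _
      (fun acc b _ => PySem.List.foldl_if_add_one _ _ _)]
  rw [PySem.List.foldl_add]
  rfl

-- B equals the double sum of pair counts
lemma pvAlt_eq (nums : List Int) :
    find_quadruples_optim_alt nums =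
    ((PySem.List.pyRange 2 ((nums.length : Int) - 1) 1).map (fun c => pvT nums c)).sum := by
  simp only [find_quadruples_optim_alt]
  rw [PySem.List.foldl_congr_mem _ _ (fun acc c => acc + pvT nums c) _ ?_]
  · rw [PySem.List.foldl_add, zero_add]
  · intro acc c _
    rw [PySem.List.foldl_congr_mem _ _
        (fun acc d => acc + pvS nums c (pvGet nums d - pvGet nums c)) _ ?_]
    · rw [PySem.List.foldl_add]; rfl
    · intro acc d _
      exact pvPair nums c (pvGet nums d - pvGet nums c) acc

-- A's dict-update loop adds exactly the pair counts with b = c - 1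
lemma pvDict (nums : List Int) (c t : Int) (dct : PySem.Dict Int Int) :
    ((PySem.List.pyRange 0 (c - 1) 1).foldl
      (fun dct a => dct.modify (pvGet nums a + pvGet nums (c - 1)) 0 (· + 1)) dct).getD t 0
    = dct.getD t 0 + (((PySem.List.pyRange 0 (c - 1) 1).countP
        (fun a => pvGet nums a + pvGet nums (c - 1) == t)) : Int) := by
  rw [← List.foldl_map (f := fun a => pvGet nums a + pvGet nums (c - 1))
      (g := fun (d : PySem.Dict Int Int) x => d.modify x 0 (· + 1))]
  rw [PySem.Dict.getD_foldl_modify_add_one]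
  congr 1
  rw [List.count_eq_countP, List.countP_map]
  rfl

-- pvS grows by the b = c-1 column when c increases by one
lemma pvS_step (nums : List Int) (c t : Int) (h : 2 ≤ c) :
    pvS nums c t = pvS nums (c - 1) t
      + (((PySem.List.pyRange 0 (c - 1) 1).countP
          (fun a => pvGet nums a + pvGet nums (c - 1) == t)) : Int) := by
  have hc : c = (c - 1) + 1 := by omega
  unfold pvS
  rw [hc, PySem.List.pyRange_one_succ_right (by omega), List.map_append, List.sum_append]
  simp

-- pvS at c = 1 is zero (no pairs)
lemma pvS_one (nums : List Int) (t : Int) : pvS nums 1 t = 0 := by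
  unfold pvS
  rw [PySem.List.pyRange_one_eq_nil (by omega)]
  rfl

-- main invariant of A's c-loop: with the table holding the pair counts below c0,
-- the remaining iterations add the per-c contributions pvT
lemma pvLoopA (nums : List Int) : ∀ (j : Nat) (c0 : Int), 2 ≤ c0 →
    ∀ (q : Int) (dct : PySem.Dict Int Int),
    (∀ t, dct.getD t 0 = pvS nums (c0 - 1) t) →
    ((PySem.List.pyRange c0 (c0 + (j : Int)) 1).foldl (fun (st : Int × PySem.Dict Int Int) c =>
      let b := c - 1
      let d1 := (PySem.List.pyRange 0 b 1).foldl
        (fun dct a => dct.modify (pvGet nums a + pvGet nums b) 0 (· + 1)) st.2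
      let q := (PySem.List.pyRange (c + 1) (nums.length : Int) 1).foldl
        (fun acc d => acc + d1.getD (-(pvGet nums c) + pvGet nums d) 0) st.1
      (q, d1)) (q, dct)).1
    = q + ((PySem.List.pyRange c0 (c0 + (j : Int)) 1).map (fun c => pvT nums c)).sum := by
  intro j
  induction j with
  | zero =>
    intro c0 _ q dct _
    rw [show c0 + ((0 : Nat) : Int) = c0 by omega, PySem.List.pyRange_one_eq_nil (by omega)]
    simp
  | succ j ih =>
    intro c0 hc0 q dct hinv
    rw [show c0 + ((j + 1 : Nat) : Int) = (c0 + 1) + (j : Int) by push_cast; omega]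
    rw [PySem.List.pyRange_one_cons (by omega), List.foldl_cons, List.map_cons, List.sum_cons]
    simp only []
    set d1 := (PySem.List.pyRange 0 (c0 - 1) 1).foldl
      (fun dct a => dct.modify (pvGet nums a + pvGet nums (c0 - 1)) 0 (· + 1)) dct with hd1
    have hd1inv : ∀ t, d1.getD t 0 = pvS nums c0 t := by
      intro t
      rw [hd1, pvDict, hinv, ← pvS_step nums c0 t hc0]
    have hq : (PySem.List.pyRange (c0 + 1) (nums.length : Int) 1).foldl
        (fun acc d => acc + d1.getD (-(pvGet nums c0) + pvGet nums d) 0) q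
        = q + pvT nums c0 := by
      rw [PySem.List.foldl_congr_mem _ _
          (fun acc d => acc + pvS nums c0 (pvGet nums d - pvGet nums c0)) _ ?_]
      · rw [PySem.List.foldl_add]; rfl
      · intro acc d _
        rw [hd1inv, neg_add_eq_sub]
    rw [hq]
    have hIH := ih (c0 + 1) (by omega) (q + pvT nums c0) d1
      (by intro t; rw [hd1inv]; norm_num)
    simp only [] at hIH
    rw [hIH]
    ring

-- ===== VERDICT (by name: the statement is the Claim_ definition above) =====
theorem find_quadruples_optim_spec : Claim_equal_find_quadruples_optim := by
  intro nums _
  unfold Spec_find_quadruples_optim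
  rw [pvAlt_eq]
  simp only [find_quadruples_optim]
  by_cases h : (nums.length : Int) - 1 ≤ 2
  · rw [PySem.List.pyRange_one_eq_nil h]
    rfl
  · have hj : (nums.length : Int) - 1 = 2 + (((nums.length : Int) - 3).toNat : Int) := by omega
    rw [hj]
    have h0 : ∀ t : Int, (PySem.Dict.empty : PySem.Dict Int Int).getD t 0 = pvS nums (2 - 1) t := by
      intro t
      rw [show (2 : Int) - 1 = 1 by omega, pvS_one]
      rfl
    have := pvLoopA nums ((nums.length : Int) - 3).toNat 2 (by omega) 0 PySem.Dict.empty h0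
    simp only [] at this ⊢
    rw [this, zero_add]
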